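-- pv_equiv track=rewrite | github.com/ElSchutzL/Exercicios_python | Exercicio_75.py | marcar_pontos
-- ===== SOURCE A (Python) =====
-- def marcar_pontos(x, memo=None):
--     if memo is None:
--         memo = {}
--
--     if x == 0:
--         return 1
--     if x < 0:
--         return 0
--
--     if x in memo:
--         return memo[x]
--     memo[x] = marcar_pontos(x-1, memo) + marcar_pontos(x-2, memo) + marcar_pontos(x-3, memo)
--
--     return memo[x]
-- ===== SOURCE B (Python) =====
-- def marcar_pontos(x, memo=None):
--     if memo is None:
--         memo = {}
--     if x < 0:
--         return 0
--
--     def value(j):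
--         if j == 0:
--             return 1
--         if j < 0:
--             return 0
--         return memo[j]
--
--     for k in range(1, x + 1):
--         if k not in memo:
--             memo[k] = value(k - 1) + value(k - 2) + value(k - 3)
--     return value(x)
-- ===== Notes on version B (the rewrite author's own statement) =====
-- stated objective: alternative
-- what changed: replaces top-down memoized recursion with a bottom-up dynamic-programming loop that fills the memo table iteratively; Pre_ excludes x > 900, where A's recursion depth can exceed CPython's stack limit and raise RecursionError (where A still returns there, B returns the same value)
-- outside the precondition, e.g. on marcar_pontos(1200, {1197: 1, 1198: 2, 1199: 3}): A returns 6, B returns 6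
import Mathlib
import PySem

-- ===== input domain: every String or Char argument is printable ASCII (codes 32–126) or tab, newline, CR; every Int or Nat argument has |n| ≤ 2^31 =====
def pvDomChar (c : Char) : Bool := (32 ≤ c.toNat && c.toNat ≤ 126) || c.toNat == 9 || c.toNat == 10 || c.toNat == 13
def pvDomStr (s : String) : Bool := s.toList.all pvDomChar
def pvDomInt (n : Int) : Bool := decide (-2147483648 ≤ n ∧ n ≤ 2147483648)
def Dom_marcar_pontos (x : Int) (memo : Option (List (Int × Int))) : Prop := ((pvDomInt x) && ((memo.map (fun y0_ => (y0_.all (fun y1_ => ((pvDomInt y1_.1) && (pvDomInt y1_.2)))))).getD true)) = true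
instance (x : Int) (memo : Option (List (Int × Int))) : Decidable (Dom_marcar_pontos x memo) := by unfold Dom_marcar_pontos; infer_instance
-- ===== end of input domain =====

-- B replaces A's top-down memoized recursion by a bottom-up dynamic-programming loop filling the
-- memo table iteratively (no recursion); equivalence is about the RETURN value only — both Pythons
-- mutate the caller's memo dict, but B fills every key 1..x while A fills only the keys it recurses into.


-- ===== PORT A =====
-- the recursive body of A, threading the (mutated) memo dict through the calls
def pvGoA (x : Int) (m : PySem.Dict Int Int) : Int × PySem.Dict Int Int :=
  if x = 0 then (1, m)
  else if x < 0 then (0, m)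
  else
    match m.get? x with
    | some v => (v, m)
    | none =>
      let r1 := pvGoA (x - 1) m
      let r2 := pvGoA (x - 2) r1.2
      let r3 := pvGoA (x - 3) r2.2
      let m4 := r3.2.insert x (r1.1 + r2.1 + r3.1)
      (m4.getD x 0, m4)
termination_by x.toNat
decreasing_by all_goals omega

def marcar_pontos (x : Int) (memo : Option (List (Int × Int))) : Int :=
  (pvGoA x (PySem.Dict.ofList (memo.getD []))).1

-- ===== PORT B =====
-- B's local helper `value(j)`; `memo[j]` is ported as get? with default 0 — exact here because on
-- every state B reaches, the key is present whenever this branch is taken (proved below)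
def pvValB (d : PySem.Dict Int Int) (j : Int) : Int :=
  if j = 0 then 1
  else if j < 0 then 0
  else (d.get? j).getD 0

-- the loop body of B: fill memo[k] unless already present
def pvStepB (d : PySem.Dict Int Int) (k : Int) : PySem.Dict Int Int :=
  match d.get? k with
  | some _ => d
  | none => d.insert k (pvValB d (k - 1) + pvValB d (k - 2) + pvValB d (k - 3))

def marcar_pontos_alt (x : Int) (memo : Option (List (Int × Int))) : Int :=
  let d := PySem.Dict.ofList (memo.getD [])
  if x < 0 then 0
  else pvValB ((PySem.List.pyRange 1 (x + 1) 1).foldl pvStepB d) x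

-- ===== PRECONDITION & SPEC =====
-- Pre_ excludes large x (> 900): there A's deep recursion can exceed CPython's default stack
-- limit and raise RecursionError; on the excluded inputs where A still returns (a pre-filled
-- memo short-circuiting the recursion, or depth just under the limit) B returns the same value.
def Pre_marcar_pontos (x : Int) (_memo : Option (List (Int × Int))) : Prop := x ≤ 900
instance (x : Int) (memo : Option (List (Int × Int))) : Decidable (Pre_marcar_pontos x memo) := by unfold Pre_marcar_pontos; infer_instance
def pvWitness_marcar_pontos : Int × (Option (List (Int × Int))) := (10, some [(2, 2)])

def Spec_marcar_pontos (x : Int) (memo : Option (List (Int × Int))) (out : Int) : Prop := out = marcar_pontos_alt x memo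
instance (x : Int) (memo : Option (List (Int × Int))) (out : Int) : Decidable (Spec_marcar_pontos x memo out) := by unfold Spec_marcar_pontos; infer_instance

-- ===== CLAIM (what is proved, stated in full; the proofs are below) =====
def Claim_equal_marcar_pontos : Prop := ∀ (x : Int) (memo : Option (List (Int × Int))), Dom_marcar_pontos x memo → Pre_marcar_pontos x memo → Spec_marcar_pontos x memo (marcar_pontos x memo)

-- ===== LEMMAS AND PROOFS =====

-- the mathematical value both programs compute: count w.r.t. a FIXED memo
def pvF (x : Int) (m : PySem.Dict Int Int) : Int :=
  if x = 0 then 1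
  else if x < 0 then 0
  else
    match m.get? x with
    | some v => v
    | none => pvF (x - 1) m + pvF (x - 2) m + pvF (x - 3) m
termination_by x.toNat
decreasing_by all_goals omega

theorem pvF_eq (x : Int) (m : PySem.Dict Int Int) :
    pvF x m = if x = 0 then 1
      else if x < 0 then 0
      else
        match m.get? x with
        | some v => v
        | none => pvF (x - 1) m + pvF (x - 2) m + pvF (x - 3) m := by
  rw [pvF]

theorem pvF_zero (m : PySem.Dict Int Int) : pvF 0 m = 1 := by
  rw [pvF_eq]; simp

theorem pvF_of_neg (x : Int) (m : PySem.Dict Int Int) (h : x < 0) : pvF x m = 0 := by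
  rw [pvF_eq, if_neg (by omega : ¬ x = 0), if_pos h]

theorem pvF_of_get?_some (x v : Int) (m : PySem.Dict Int Int) (h0 : ¬ x = 0) (hneg : ¬ x < 0)
    (hm : m.get? x = some v) : pvF x m = v := by
  rw [pvF_eq, if_neg h0, if_neg hneg, hm]

theorem pvF_of_get?_none (x : Int) (m : PySem.Dict Int Int) (h0 : ¬ x = 0) (hneg : ¬ x < 0)
    (hm : m.get? x = none) : pvF x m = pvF (x - 1) m + pvF (x - 2) m + pvF (x - 3) m := by
  rw [pvF_eq, if_neg h0, if_neg hneg, hm]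

-- m' is m extended only with entries consistent with pvF . m
def pvCons (m m' : PySem.Dict Int Int) : Prop :=
  ∀ k, m'.get? k = m.get? k ∨ m'.get? k = some (pvF k m)

theorem pvCons_refl (m : PySem.Dict Int Int) : pvCons m m := fun _ => Or.inl rfl

theorem pvF_cons (m m' : PySem.Dict Int Int) (h : pvCons m m') (x : Int) :
    pvF x m' = pvF x m := by
  induction hn : x.toNat using Nat.strong_induction_on generalizing x with
  | _ n ih =>
    subst hn
    by_cases h0 : x = 0
    · rw [h0, pvF_zero, pvF_zero]
    by_cases hneg : x < 0
    · rw [pvF_of_neg x m' hneg, pvF_of_neg x m hneg]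
    rcases h x with heq | heq
    · cases hm : m.get? x with
      | some v =>
        rw [pvF_of_get?_some x v m' h0 hneg (heq.trans hm), pvF_of_get?_some x v m h0 hneg hm]
      | none =>
        have e1 := ih (x - 1).toNat (by omega) (x - 1) rfl
        have e2 := ih (x - 2).toNat (by omega) (x - 2) rfl
        have e3 := ih (x - 3).toNat (by omega) (x - 3) rfl
        rw [pvF_of_get?_none x m' h0 hneg (heq.trans hm), pvF_of_get?_none x m h0 hneg hm,
          e1, e2, e3]
    · rw [pvF_of_get?_some x (pvF x m) m' h0 hneg heq]

theorem pvCons_trans (m m1 m2 : PySem.Dict Int Int)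
    (h1 : pvCons m m1) (h2 : pvCons m1 m2) : pvCons m m2 := by
  intro k
  rcases h2 k with e | e
  · rw [e]; exact h1 k
  · right; rw [e, pvF_cons m m1 h1]

theorem pvGoA_spec (x : Int) (m : PySem.Dict Int Int) :
    (pvGoA x m).1 = pvF x m ∧ pvCons m (pvGoA x m).2 := by
  induction hn : x.toNat using Nat.strong_induction_on generalizing x m with
  | _ n ih =>
    subst hn
    by_cases h0 : x = 0
    · rw [pvGoA]
      simp only [if_pos h0]
      exact ⟨by rw [h0, pvF_zero], pvCons_refl m⟩
    by_cases hneg : x < 0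
    · rw [pvGoA]
      simp only [if_neg h0, if_pos hneg]
      exact ⟨(pvF_of_neg x m hneg).symm, pvCons_refl m⟩
    rw [pvGoA]
    simp only [if_neg h0, if_neg hneg]
    cases hm : m.get? x with
    | some v =>
      exact ⟨(pvF_of_get?_some x v m h0 hneg hm).symm, pvCons_refl m⟩
    | none =>
      have hFx := pvF_of_get?_none x m h0 hneg hm
      obtain ⟨v1, c1⟩ := ih (x - 1).toNat (by omega) (x - 1) m rfl
      obtain ⟨v2', c2⟩ := ih (x - 2).toNat (by omega) (x - 2) (pvGoA (x - 1) m).2 rfl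
      have v2 : (pvGoA (x - 2) (pvGoA (x - 1) m).2).1 = pvF (x - 2) m := by
        rw [v2', pvF_cons m _ c1]
      have c12 : pvCons m (pvGoA (x - 2) (pvGoA (x - 1) m).2).2 := pvCons_trans _ _ _ c1 c2
      obtain ⟨v3', c3⟩ := ih (x - 3).toNat (by omega) (x - 3) (pvGoA (x - 2) (pvGoA (x - 1) m).2).2 rfl
      have v3 : (pvGoA (x - 3) (pvGoA (x - 2) (pvGoA (x - 1) m).2).2).1 = pvF (x - 3) m := by
        rw [v3', pvF_cons m _ c12]
      have c123 : pvCons m (pvGoA (x - 3) (pvGoA (x - 2) (pvGoA (x - 1) m).2).2).2 :=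
        pvCons_trans _ _ _ c12 c3
      constructor
      · show ((pvGoA (x - 3) (pvGoA (x - 2) (pvGoA (x - 1) m).2).2).2.insert x
            ((pvGoA (x - 1) m).1 + (pvGoA (x - 2) (pvGoA (x - 1) m).2).1 +
              (pvGoA (x - 3) (pvGoA (x - 2) (pvGoA (x - 1) m).2).2).1)).getD x 0 = pvF x m
        rw [PySem.Dict.getD_insert, if_pos rfl, v1, v2, v3, hFx]
      · intro k
        by_cases hk : k = x
        · right
          subst hk
          show ((pvGoA (k - 3) (pvGoA (k - 2) (pvGoA (k - 1) m).2).2).2.insert k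
            ((pvGoA (k - 1) m).1 + (pvGoA (k - 2) (pvGoA (k - 1) m).2).1 +
              (pvGoA (k - 3) (pvGoA (k - 2) (pvGoA (k - 1) m).2).2).1)).get? k = some (pvF k m)
          rw [PySem.Dict.get?_insert, if_pos rfl, v1, v2, v3, hFx]
        · show ((pvGoA (x - 3) (pvGoA (x - 2) (pvGoA (x - 1) m).2).2).2.insert x
            ((pvGoA (x - 1) m).1 + (pvGoA (x - 2) (pvGoA (x - 1) m).2).1 +
              (pvGoA (x - 3) (pvGoA (x - 2) (pvGoA (x - 1) m).2).2).1)).get? k = m.get? k ∨ _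
          rw [PySem.Dict.get?_insert, if_neg hk]
          exact c123 k

-- under pvCons, a key present in m' with 1 ≤ j stores exactly pvF j m
theorem pvCons_get_some (m m' : PySem.Dict Int Int) (h : pvCons m m') (j v : Int)
    (hj : 1 ≤ j) (hm : m'.get? j = some v) : v = pvF j m := by
  rcases h j with e | e
  · exact (pvF_of_get?_some j v m (by omega) (by omega) (e.symm.trans hm)).symm
  · rw [hm] at e; exact (Option.some.injEq _ _ ▸ e)

theorem pvCons_get_none (m m' : PySem.Dict Int Int) (h : pvCons m m') (j : Int)
    (hm : m'.get? j = none) : m.get? j = none := by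
  rcases h j with e | e
  · rw [← e, hm]
  · rw [hm] at e; cases e

-- B's loop invariant: after folding range 1..k, the dict is consistent with pvF . m0
-- and holds pvF j m0 at every key 1..k
theorem pvFoldB (m0 : PySem.Dict Int Int) (k : Nat) :
    pvCons m0 ((PySem.List.pyRange 1 ((k : Int) + 1) 1).foldl pvStepB m0) ∧
    ∀ j : Int, 1 ≤ j → j ≤ (k : Int) →
      ((PySem.List.pyRange 1 ((k : Int) + 1) 1).foldl pvStepB m0).get? j = some (pvF j m0) := by
  induction k with
  | zero =>
    rw [PySem.List.pyRange_one_eq_nil (by omega)]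
    exact ⟨pvCons_refl m0, fun j h1 h2 => absurd h1 (by omega)⟩
  | succ n ihn =>
    obtain ⟨hc, hall⟩ := ihn
    set m := (PySem.List.pyRange 1 ((n : Int) + 1) 1).foldl pvStepB m0 with hm
    have hsplit : PySem.List.pyRange 1 ((n : Int) + 1 + 1) 1 =
        PySem.List.pyRange 1 ((n : Int) + 1) 1 ++ [(n : Int) + 1] :=
      PySem.List.pyRange_one_succ_right (by omega)
    have hcast : ((n + 1 : Nat) : Int) = (n : Int) + 1 := by push_cast; ring
    rw [hcast, hsplit, List.foldl_append, ← hm]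
    simp only [List.foldl_cons, List.foldl_nil]
    have hval : ∀ j : Int, j ≤ (n : Int) → pvValB m j = pvF j m0 := by
      intro j hj
      unfold pvValB
      by_cases h0 : j = 0
      · rw [if_pos h0, h0, pvF_zero]
      by_cases hneg : j < 0
      · rw [if_neg h0, if_pos hneg, pvF_of_neg j m0 hneg]
      · rw [if_neg h0, if_neg hneg, hall j (by omega) hj]; rfl
    have hget : (pvStepB m ((n : Int) + 1)).get? ((n : Int) + 1) = some (pvF ((n : Int) + 1) m0) := by
      unfold pvStepB
      cases hg : m.get? ((n : Int) + 1) with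
      | some v =>
        simp only [hg]
        rw [pvCons_get_some m0 m hc ((n : Int) + 1) v (by omega) hg]
      | none =>
        rw [PySem.Dict.get?_insert, if_pos rfl,
          hval _ (by omega), hval _ (by omega), hval _ (by omega),
          ← pvF_of_get?_none ((n : Int) + 1) m0 (by omega) (by omega)
            (pvCons_get_none m0 m hc _ hg)]
    have hother : ∀ j : Int, j ≠ (n : Int) + 1 →
        (pvStepB m ((n : Int) + 1)).get? j = m.get? j := by
      intro j hj
      unfold pvStepB
      cases hg : m.get? ((n : Int) + 1) with
      | some v => rfl
      | none => rw [PySem.Dict.get?_insert, if_neg hj]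
    constructor
    · intro j
      by_cases hj : j = (n : Int) + 1
      · right; rw [hj, hget]
      · rw [hother j hj]; exact hc j
    · intro j h1 h2
      by_cases hj : j = (n : Int) + 1
      · rw [hj, hget]
      · rw [hother j hj]; exact hall j h1 (by omega)

-- ===== VERDICT (by name: the statement is the Claim_ definition above) =====
theorem marcar_pontos_spec : Claim_equal_marcar_pontos := by
  intro x memo _ _
  unfold Spec_marcar_pontos marcar_pontos marcar_pontos_alt
  set m0 := PySem.Dict.ofList (memo.getD []) with hm0
  by_cases hneg : x < 0
  · rw [if_pos hneg, (pvGoA_spec x _).1, pvF_of_neg x _ hneg]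
  · rw [if_neg hneg]
    have hk : x = ((x.toNat : Nat) : Int) := by omega
    rw [(pvGoA_spec x _).1]
    conv_rhs => rw [hk]
    obtain ⟨hc, hall⟩ := pvFoldB m0 x.toNat
    by_cases h0 : x = 0
    · subst h0
      simp only [Int.toNat_zero, Nat.cast_zero]
      unfold pvValB
      rw [if_pos rfl, pvF_zero]
    · unfold pvValB
      rw [if_neg (by omega : ¬ ((x.toNat : Nat) : Int) = 0),
        if_neg (by omega : ¬ ((x.toNat : Nat) : Int) < 0),
        hall _ (by omega) (by omega)]
      show pvF x m0 = pvF ((x.toNat : Nat) : Int) m0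
      rw [← hk]
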